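-- pv_equiv track=rewrite | github.com/toastx/litcoder-assignment-python | mod3/lab1/maximise number of subsequence/main.py | maximize_subsequences
-- ===== SOURCE A (Python) =====
-- def maximize_subsequences(text, pattern):
--         res,count1,count2 = 0,0,0
--         for char in text:
--             if char == pattern[1]:
--                 res += count1
--                 count2 += 1
--             if char == pattern[0]:
--                 count1 += 1
--         return res + max(count1, count2)
-- ===== SOURCE B (Python) =====
-- def maximize_subsequences(text, pattern):
--     # Staged approach: collect the index lists of the two pattern characters,
--     # then merge-scan them with a monotone pointer: for each occurrence of
--     # pattern[1], add the number of pattern[0]-positions strictly before it.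
--     a, b = pattern[0], pattern[1]
--     pos_a = [i for i, c in enumerate(text) if c == a]
--     pos_b = [i for i, c in enumerate(text) if c == b]
--     res = 0
--     k = 0
--     for j in pos_b:
--         while k < len(pos_a) and pos_a[k] < j:
--             k += 1
--         res += k
--     return res + max(len(pos_a), len(pos_b))
-- ===== Notes on version B (the rewrite author's own statement) =====
-- stated objective: alternative
-- what changed: B first materialises the index lists of pattern[0] and pattern[1] and then merge-scans them with a monotone pointer (for each pattern[1]-position, the number of pattern[0]-positions before it), instead of A's single pass over the text with running prefix counters.
-- outside the precondition, e.g. on maximize_subsequences('', ''): A returns 0, B raises IndexError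
import Mathlib
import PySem

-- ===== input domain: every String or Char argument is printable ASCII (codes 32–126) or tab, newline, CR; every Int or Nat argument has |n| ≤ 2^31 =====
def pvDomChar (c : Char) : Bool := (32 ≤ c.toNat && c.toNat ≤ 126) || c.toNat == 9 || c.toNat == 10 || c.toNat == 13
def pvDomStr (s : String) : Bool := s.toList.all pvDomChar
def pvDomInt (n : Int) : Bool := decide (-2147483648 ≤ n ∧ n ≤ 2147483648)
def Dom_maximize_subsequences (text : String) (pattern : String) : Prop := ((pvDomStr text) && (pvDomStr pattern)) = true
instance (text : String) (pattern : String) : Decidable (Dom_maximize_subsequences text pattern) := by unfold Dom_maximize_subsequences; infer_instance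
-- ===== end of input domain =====

-- B replaces A's single pass with running prefix counters by a staged algorithm: it builds
-- the index lists of pattern[0] and pattern[1] and merge-scans them with a monotone pointer;
-- objective: alternative (same O(n) cost).


-- ===== PORT A =====
-- one loop iteration of A: state (res, count1, count2), branches in A's order
def stepA (a b : Char) (st : Int × Int × Int) (c : Char) : Int × Int × Int :=
  let res := if c = b then st.1 + st.2.1 else st.1
  let c2 := if c = b then st.2.2 + 1 else st.2.2
  let c1 := if c = a then st.2.1 + 1 else st.2.1
  (res, c1, c2)

def maximize_subsequences (text : String) (pattern : String) : Int :=
  -- pattern[1] / pattern[0]: Python raises IndexError when missing; excluded by Pre_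
  let b := (PySem.Str.pyGet? pattern 1).getD ' '
  let a := (PySem.Str.pyGet? pattern 0).getD ' '
  let st := text.toList.foldl (stepA a b) (0, 0, 0)
  st.1 + max st.2.1 st.2.2

-- ===== PORT B =====
-- the inner `while k < len(pos_a) and pos_a[k] < j: k += 1` of Source B
def advanceB (posa : List Int) (j : Int) (k : Nat) : Nat :=
  if h : k < posa.length then
    if posa[k] < j then advanceB posa j (k + 1) else k
  else k
termination_by posa.length - k

-- one outer-loop iteration of Source B: state (k, res)
def stepB (posa : List Int) (st : Nat × Int) (j : Int) : Nat × Int :=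
  let k := advanceB posa j st.1
  (k, st.2 + (k : Int))

def maximize_subsequences_alt (text : String) (pattern : String) : Int :=
  let a := (PySem.Str.pyGet? pattern 0).getD ' '
  let b := (PySem.Str.pyGet? pattern 1).getD ' '
  let posa := (PySem.List.enumerate text.toList).filterMap
    (fun ic => if ic.2 = a then some ic.1 else none)
  let posb := (PySem.List.enumerate text.toList).filterMap
    (fun ic => if ic.2 = b then some ic.1 else none)
  let st := posb.foldl (stepB posa) (0, 0)
  st.2 + max (posa.length : Int) (posb.length : Int)

-- ===== PRECONDITION & SPEC =====
-- Pre_ excludes patterns shorter than 2 characters: A raises IndexError on them whenever the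
-- text is non-empty, and only returns 0 by accident on empty text (pattern[1] never evaluated),
-- where B's up-front pattern[0]/pattern[1] access raises.
def Pre_maximize_subsequences (text : String) (pattern : String) : Prop :=
  2 ≤ pattern.toList.length
instance (text : String) (pattern : String) : Decidable (Pre_maximize_subsequences text pattern) := by
  unfold Pre_maximize_subsequences; infer_instance

def pvWitness_maximize_subsequences : String × String := ("abab", "ab")

def Spec_maximize_subsequences (text : String) (pattern : String) (out : Int) : Prop := out = maximize_subsequences_alt text pattern
instance (text : String) (pattern : String) (out : Int) : Decidable (Spec_maximize_subsequences text pattern out) := by unfold Spec_maximize_subsequences; infer_instance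

-- ===== CLAIM (what is proved, stated in full; the proofs are below) =====
def Claim_equal_maximize_subsequences : Prop := ∀ (text : String) (pattern : String), Dom_maximize_subsequences text pattern → Pre_maximize_subsequences text pattern → Spec_maximize_subsequences text pattern (maximize_subsequences text pattern)

-- ===== LEMMAS AND PROOFS =====

-- number of (i < j) pairs with l[i] = a and l[j] = b
def pairsAB (a b : Char) : List Char → Int
  | [] => 0
  | c :: l => (if c = a then (l.count b : Int) else 0) + pairsAB a b l

theorem foldA_eq (a b : Char) (l : List Char) (res c1 c2 : Int) :
    l.foldl (stepA a b) (res, c1, c2)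
      = (res + pairsAB a b l + c1 * (l.count b : Int),
         c1 + (l.count a : Int), c2 + (l.count b : Int)) := by
  induction l generalizing res c1 c2 with
  | nil => simp [pairsAB]
  | cons c l ih =>
    simp only [List.foldl_cons, stepA, ih, pairsAB, List.count_cons]
    by_cases hca : c = a <;> by_cases hcb : c = b <;>
      simp [hca, hcb] <;> (try split_ifs) <;>
      first | exact ⟨trivial, trivial, trivial⟩ | exact ⟨trivial, trivial⟩ | trivial | ring1 | (and_intros <;> ring1)

-- positions of ch in l, indices starting at s (closed characterisation of Source B's comprehensions)
def posFrom (ch : Char) (s : Int) : List Char → List Int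
  | [] => []
  | c :: l => if c = ch then s :: posFrom ch (s + 1) l else posFrom ch (s + 1) l

theorem posFrom_eq (ch : Char) (l : List Char) : ∀ s : Int,
    (PySem.List.enumerate l s).filterMap (fun ic => if ic.2 = ch then some ic.1 else none)
      = posFrom ch s l := by
  induction l with
  | nil => intro s; simp [PySem.List.enumerate_nil, posFrom]
  | cons c l ih =>
    intro s
    simp only [PySem.List.enumerate_cons, List.filterMap_cons, posFrom, ih]
    by_cases h : c = ch <;> simp [h]

theorem posFrom_length (ch : Char) (l : List Char) : ∀ s,
    (posFrom ch s l).length = l.count ch := by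
  induction l with
  | nil => intro s; simp [posFrom]
  | cons c l ih =>
    intro s
    by_cases h : c = ch <;> simp [posFrom, h, ih]

theorem posFrom_ge (ch : Char) (l : List Char) : ∀ s, ∀ x ∈ posFrom ch s l, s ≤ x := by
  induction l with
  | nil => intro s x hx; simp [posFrom] at hx
  | cons c l ih =>
    intro s x hx
    by_cases h : c = ch <;> simp [posFrom, h] at hx
    · rcases hx with rfl | hx
      · exact le_refl _
      · exact le_trans (by omega) (ih (s + 1) x hx)
    · exact le_trans (by omega) (ih (s + 1) x hx)

theorem posFrom_pairwise (ch : Char) (l : List Char) : ∀ s,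
    (posFrom ch s l).Pairwise (· ≤ ·) := by
  induction l with
  | nil => intro s; simp [posFrom]
  | cons c l ih =>
    intro s
    by_cases h : c = ch <;> simp [posFrom, h]
    · exact ⟨fun x hx => le_trans (by omega) (posFrom_ge ch l (s + 1) x hx), ih (s + 1)⟩
    · exact ih (s + 1)

-- on a (≤)-sorted list, takeWhile (< j) is filter (< j)
theorem takeWhile_eq_filter_of_sorted (j : Int) (l : List Int)
    (hs : l.Pairwise (· ≤ ·)) :
    l.takeWhile (fun x => decide (x < j)) = l.filter (fun x => decide (x < j)) := by
  induction l with
  | nil => rfl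
  | cons x l ih =>
    rcases hs with _ | ⟨hx, hs⟩
    by_cases h : x < j
    · simp [h, ih hs]
    · simp only [List.takeWhile_cons, List.filter_cons, h, decide_false]
      simp only [Bool.false_eq_true, if_false]
      rw [List.filter_eq_nil_iff.mpr]
      intro y hy
      have := hx y hy
      simp; omega

theorem advanceB_eq (posa : List Int) (j : Int) : ∀ k,
    advanceB posa j k = k + ((posa.drop k).takeWhile (fun x => decide (x < j))).length := by
  intro k
  induction hk : posa.length - k using Nat.strong_induction_on generalizing k with
  | _ n ih =>
    subst hk
    unfold advanceB
    by_cases h : k < posa.length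
    · have hdrop : posa.drop k = posa[k] :: posa.drop (k + 1) :=
        (List.getElem_cons_drop h).symm
      rw [dif_pos h, hdrop, List.takeWhile_cons]
      by_cases hlt : posa[k] < j
      · have hrec := ih (posa.length - (k + 1)) (by omega) (k + 1) rfl
        rw [if_pos hlt, hrec]
        simp [hlt]
        omega
      · rw [if_neg hlt]
        simp [hlt]
    · rw [dif_neg h]
      simp [List.drop_eq_nil_of_le (by omega : posa.length ≤ k)]

-- invariant of the outer loop of Source B
theorem foldB_res (posa : List Int) (hs : posa.Pairwise (· ≤ ·)) :
    ∀ (js : List Int), js.Pairwise (· ≤ ·) →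
    ∀ (k : Nat) (res : Int), k ≤ posa.length →
    (∀ x ∈ posa.take k, ∀ j ∈ js, x < j) →
    (js.foldl (stepB posa) (k, res)).2
      = res + (js.map (fun j => ((posa.filter (fun x => decide (x < j))).length : Int))).sum := by
  intro js
  induction js with
  | nil => intro _ k res _ _; simp
  | cons j0 js ih =>
    intro hpw k res hk hinv
    rcases hpw with _ | ⟨hj0, hpw⟩
    have hdrop_pw : (posa.drop k).Pairwise (· ≤ ·) := hs.sublist (List.drop_sublist k posa)
    have hadv : advanceB posa j0 k
        = k + ((posa.drop k).takeWhile (fun x => decide (x < j0))).length := advanceB_eq posa j0 k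
    have htf : (posa.drop k).takeWhile (fun x => decide (x < j0))
        = (posa.drop k).filter (fun x => decide (x < j0)) :=
      takeWhile_eq_filter_of_sorted j0 (posa.drop k) hdrop_pw
    -- k' = number of posa elements < j0
    have hsplit : posa.filter (fun x => decide (x < j0))
        = (posa.take k).filter (fun x => decide (x < j0))
          ++ (posa.drop k).filter (fun x => decide (x < j0)) := by
      conv_lhs => rw [← List.take_append_drop k posa]
      rw [List.filter_append]
    have htake_all : (posa.take k).filter (fun x => decide (x < j0)) = posa.take k := by
      rw [List.filter_eq_self]
      intro x hx
      simp [hinv x hx j0 (List.mem_cons_self ..)]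
    have hk' : advanceB posa j0 k = (posa.filter (fun x => decide (x < j0))).length := by
      rw [hadv, htf, hsplit, List.length_append, htake_all, List.length_take_of_le hk]
    -- take k' is take k ++ the takeWhile block, all elements < j0
    have htake_prefix : (posa.drop k).takeWhile (fun x => decide (x < j0))
        = (posa.drop k).take (((posa.drop k).takeWhile (fun x => decide (x < j0))).length) :=
      List.prefix_iff_eq_take.mp (List.takeWhile_prefix _)
    have hk'le : advanceB posa j0 k ≤ posa.length := by
      rw [hk']; exact le_trans (List.length_filter_le _ _) (le_refl _)
    have htake_k' : posa.take (advanceB posa j0 k)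
        = posa.take k ++ (posa.drop k).takeWhile (fun x => decide (x < j0)) := by
      rw [hadv, List.take_add]
      congr 1
      exact htake_prefix.symm
    have hinv' : ∀ x ∈ posa.take (advanceB posa j0 k), ∀ j ∈ js, x < j := by
      intro x hx j hj
      rw [htake_k', List.mem_append] at hx
      rcases hx with hx | hx
      · exact lt_of_lt_of_le (hinv x hx j0 (List.mem_cons_self ..)) (hj0 j hj)
      · have := List.mem_takeWhile_imp hx
        simp at this
        exact lt_of_lt_of_le this (hj0 j hj)
    simp only [List.foldl_cons, stepB]
    rw [ih hpw (advanceB posa j0 k) (res + (advanceB posa j0 k : Int)) hk'le hinv']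
    simp only [List.map_cons, List.sum_cons, hk']
    ring

-- sum of a constant plus a function over a list
theorem sum_map_const_add (c0 : Int) (f : Int → Int) : ∀ js : List Int,
    (js.map (fun j => c0 + f j)).sum = c0 * (js.length : Int) + (js.map f).sum := by
  intro js
  induction js with
  | nil => simp
  | cons j js ih => simp [ih]; ring

-- the staged count equals the pair count
theorem pos_sum_eq (a b : Char) (l : List Char) : ∀ s : Int,
    ((posFrom b s l).map
        (fun j => (((posFrom a s l).filter (fun x => decide (x < j))).length : Int))).sum
      = pairsAB a b l := by
  induction l with
  | nil => intro s; simp [posFrom, pairsAB]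
  | cons c l ih =>
    intro s
    have hzero : ((posFrom a s (c :: l)).filter (fun x => decide (x < s))) = [] := by
      rw [List.filter_eq_nil_iff]
      intro x hx
      have := posFrom_ge a (c :: l) s x hx
      simp; omega
    have hterm : ∀ j ∈ posFrom b (s + 1) l,
        (((posFrom a s (c :: l)).filter (fun x => decide (x < j))).length : Int)
          = (if c = a then (1 : Int) else 0)
            + (((posFrom a (s + 1) l).filter (fun x => decide (x < j))).length : Int) := by
      intro j hj
      have hj1 : s + 1 ≤ j := posFrom_ge b l (s + 1) j hj
      by_cases hca : c = a
      · simp [posFrom, hca, List.filter_cons, show s < j by omega]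
        omega
      · simp [posFrom, hca]
    have hmap : (posFrom b (s + 1) l).map
          (fun j => (((posFrom a s (c :: l)).filter (fun x => decide (x < j))).length : Int))
        = (posFrom b (s + 1) l).map
          (fun j => (if c = a then (1 : Int) else 0)
            + (((posFrom a (s + 1) l).filter (fun x => decide (x < j))).length : Int)) :=
      List.map_congr_left hterm
    have hsum : ((posFrom b (s + 1) l).map
          (fun j => (((posFrom a s (c :: l)).filter (fun x => decide (x < j))).length : Int))).sum
        = (if c = a then (l.count b : Int) else 0) + pairsAB a b l := by
      rw [hmap, sum_map_const_add, ih (s + 1), posFrom_length]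
      by_cases hca : c = a <;> simp [hca]
    by_cases hcb : c = b
    · have hB : posFrom b s (c :: l) = s :: posFrom b (s + 1) l := by
        simp [posFrom, hcb]
      rw [hB, List.map_cons, List.sum_cons, hzero, hsum]
      simp [pairsAB]
    · have hB : posFrom b s (c :: l) = posFrom b (s + 1) l := by
        simp [posFrom, hcb]
      rw [hB, hsum]
      simp [pairsAB]

-- ===== VERDICT (by name: the statement is the Claim_ definition above) =====
theorem maximize_subsequences_spec : Claim_equal_maximize_subsequences := by
  intro text pattern _dom _pre
  unfold Spec_maximize_subsequences maximize_subsequences maximize_subsequences_alt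
  simp only [posFrom_eq]
  set a := (PySem.Str.pyGet? pattern 0).getD ' '
  set b := (PySem.Str.pyGet? pattern 1).getD ' '
  set l := text.toList
  rw [foldA_eq]
  rw [foldB_res (posFrom a 0 l) (posFrom_pairwise a l 0) (posFrom b 0 l)
      (posFrom_pairwise b l 0) 0 0 (Nat.zero_le _) (by simp)]
  rw [pos_sum_eq a b l 0]
  simp [posFrom_length]
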